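-- pv_equiv track=rewrite | github.com/LIKELION-INHA-9-ALGORITHM-STUDY/likelion-inha-9-algorithm-study | week-08/임영빈/05/solution.py | b_search_recur
-- ===== SOURCE A (Python) =====
-- def b_search_recur(arr, target, low, high):
-- 	if low >= high:
-- 		return low
-- 	middle = (low + high) // 2
--
-- 	total = 0
-- 	for t in arr:
-- 		total += middle // t # 주어진 시간이 middle일 때 심사할 수 있는 최대 인원의 수
-- 	if total >= target:
-- 		return b_search_recur(arr, target, low, middle)
-- 	else:
-- 		return b_search_recur(arr, target, middle + 1, high)
-- ===== SOURCE B (Python) =====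
-- def b_search_recur(arr, target, low, high):
--     while low < high:
--         middle = (low + high) // 2
--         total = sum(middle // t for t in arr)
--         if total >= target:
--             high = middle
--         else:
--             low = middle + 1
--     return low
-- ===== Notes on version B (the rewrite author's own statement) =====
-- stated objective: idiomatic
-- what changed: Replaced the recursive binary search with an iterative while-loop that narrows [low, high) in place and computes the feasibility count with sum() over a generator instead of an explicit accumulator loop.
import Mathlib
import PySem

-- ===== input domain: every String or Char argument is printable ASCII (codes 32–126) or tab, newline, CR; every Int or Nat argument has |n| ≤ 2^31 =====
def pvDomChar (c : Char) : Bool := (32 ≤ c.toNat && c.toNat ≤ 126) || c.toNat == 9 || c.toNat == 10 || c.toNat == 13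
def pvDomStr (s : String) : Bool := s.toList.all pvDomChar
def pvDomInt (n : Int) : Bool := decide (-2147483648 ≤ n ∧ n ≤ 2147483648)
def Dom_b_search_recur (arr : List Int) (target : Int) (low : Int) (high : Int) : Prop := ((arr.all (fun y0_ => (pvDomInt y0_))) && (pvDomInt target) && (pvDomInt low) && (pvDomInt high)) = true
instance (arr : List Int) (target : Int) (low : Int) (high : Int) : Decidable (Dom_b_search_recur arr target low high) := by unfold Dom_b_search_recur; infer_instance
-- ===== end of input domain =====

-- B is the same binary search written as an iterative while-loop (O(1) stack) with the
-- per-time feasibility count taken by sum() over a generator instead of an accumulator loop.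

-- ===== PORT A =====
def b_search_recur (arr : List Int) (target : Int) (low : Int) (high : Int) : Int :=
  if low ≥ high then low
  else
    let middle := PySem.Int.floordiv (low + high) 2
    let total := arr.foldl (fun total t => total + PySem.Int.floordiv middle t) 0
    if total ≥ target then b_search_recur arr target low middle
    else b_search_recur arr target (middle + 1) high
termination_by (high - low).toNat
decreasing_by
  all_goals
    simp only [PySem.Int.floordiv_eq_ediv_of_pos (by omega : (0:Int) < 2)] at *
    omega

-- ===== PORT B =====
-- the while-loop of Source B; the fuel (high - low).toNat bounds the number of iterations,
-- since each iteration strictly shrinks the interval [low, high)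
def bsrLoop (arr : List Int) (target : Int) : Nat → Int → Int → Int
  | 0, low, _ => low
  | fuel + 1, low, high =>
    if low < high then
      let middle := PySem.Int.floordiv (low + high) 2
      if (arr.map (fun t => PySem.Int.floordiv middle t)).sum ≥ target then
        bsrLoop arr target fuel low middle
      else
        bsrLoop arr target fuel (middle + 1) high
    else low

def b_search_recur_alt (arr : List Int) (target : Int) (low : Int) (high : Int) : Int :=
  bsrLoop arr target (high - low).toNat low high

-- ===== PRECONDITION & SPEC =====
-- Pre_ excludes exactly the inputs where A raises ZeroDivisionError: low < high with 0 in arr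
-- (middle // 0 is evaluated there); B raises the same exception on those inputs.
def Pre_b_search_recur (arr : List Int) (target : Int) (low : Int) (high : Int) : Prop :=
  high ≤ low ∨ (0 : Int) ∉ arr
instance (arr : List Int) (target : Int) (low : Int) (high : Int) : Decidable (Pre_b_search_recur arr target low high) := by unfold Pre_b_search_recur; infer_instance
def pvWitness_b_search_recur : List Int × Int × Int × Int := ([3, 5], 4, 1, 10)

def Spec_b_search_recur (arr : List Int) (target : Int) (low : Int) (high : Int) (out : Int) : Prop := out = b_search_recur_alt arr target low high
instance (arr : List Int) (target : Int) (low : Int) (high : Int) (out : Int) : Decidable (Spec_b_search_recur arr target low high out) := by unfold Spec_b_search_recur; infer_instance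

-- ===== CLAIM (what is proved, stated in full; the proofs are below) =====
def Claim_equal_b_search_recur : Prop := ∀ (arr : List Int) (target : Int) (low : Int) (high : Int), Dom_b_search_recur arr target low high → Pre_b_search_recur arr target low high → Spec_b_search_recur arr target low high (b_search_recur arr target low high)

-- ===== LEMMAS AND PROOFS =====

-- A's accumulator loop computes the sum of the mapped list (B's sum()).
theorem foldl_div_sum (m : Int) (arr : List Int) (s : Int) :
    arr.foldl (fun total t => total + PySem.Int.floordiv m t) s
      = s + (arr.map (fun t => PySem.Int.floordiv m t)).sum := by
  induction arr generalizing s with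
  | nil => simp
  | cons a l ih => simp [List.foldl_cons, ih]; ring

theorem bsrLoop_eq (arr : List Int) (target : Int) (fuel : Nat) :
    ∀ (low high : Int), (high - low).toNat ≤ fuel →
      bsrLoop arr target fuel low high = b_search_recur arr target low high := by
  induction fuel with
  | zero =>
    intro low high hle
    rw [b_search_recur]
    have : low ≥ high := by omega
    simp [bsrLoop, this]
  | succ n ih =>
    intro low high hle
    rw [b_search_recur, bsrLoop]
    by_cases h : low < high
    · have hge : ¬ low ≥ high := by omega
      have hmid := PySem.Int.floordiv_eq_ediv_of_pos (b := 2) (a := low + high) (by omega)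
      simp only [h, hge, if_true, if_false, foldl_div_sum, zero_add]
      split_ifs with ht
      · exact ih low (PySem.Int.floordiv (low + high) 2) (by rw [hmid] at *; omega)
      · exact ih (PySem.Int.floordiv (low + high) 2 + 1) high (by rw [hmid] at *; omega)
    · have hge : low ≥ high := by omega
      simp [h, hge]

-- ===== VERDICT (by name: the statement is the Claim_ definition above) =====
theorem b_search_recur_spec : Claim_equal_b_search_recur := by
  intro arr target low high _ _
  unfold Spec_b_search_recur b_search_recur_alt
  exact (bsrLoop_eq arr target (high - low).toNat low high le_rfl).symm
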